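-- pv_equiv track=rewrite | github.com/AbhaySinghPersonal/BuildPortfolio | Backend/Arch/Generic - Copy.py | CreateMasterFundList
-- ===== SOURCE A (Python) =====
-- def CreateMasterFundList(Fund_Com_Lst):
--     Fund_Grp_Lst={}
--     Fields=Fund_Com_Lst[0]
--     for Fund_Row in Fund_Com_Lst:
--         Fund_Sch=Fund_Row[1]
--         if Fund_Sch not in Fund_Grp_Lst:
--             Fund_Grp_Lst[Fund_Sch]=[]
--         Fund_Grp_Lst[Fund_Sch].append(Fund_Row)
--     return Fund_Grp_Lst,Fields
-- ===== SOURCE B (Python) =====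
-- def CreateMasterFundList(Fund_Com_Lst):
--     seen = set()
--     schemes = []
--     for row in Fund_Com_Lst:
--         s = row[1]
--         if s not in seen:
--             seen.add(s)
--             schemes.append(s)
--     grp = {s: [row for row in Fund_Com_Lst if row[1] == s] for s in schemes}
--     return grp, Fund_Com_Lst[0]
-- ===== Notes on version B (the rewrite author's own statement) =====
-- stated objective: alternative
-- what changed: Replaced the single dict-building pass (create-key-if-absent then append) by a first-appearance scan collecting the distinct schemes followed by one filter over the whole list per scheme.
-- outside the precondition, e.g. on CreateMasterFundList([]): A raises IndexError, B raises IndexError; on CreateMasterFundList([['x']]): A raises IndexError, B raises IndexError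
import Mathlib
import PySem

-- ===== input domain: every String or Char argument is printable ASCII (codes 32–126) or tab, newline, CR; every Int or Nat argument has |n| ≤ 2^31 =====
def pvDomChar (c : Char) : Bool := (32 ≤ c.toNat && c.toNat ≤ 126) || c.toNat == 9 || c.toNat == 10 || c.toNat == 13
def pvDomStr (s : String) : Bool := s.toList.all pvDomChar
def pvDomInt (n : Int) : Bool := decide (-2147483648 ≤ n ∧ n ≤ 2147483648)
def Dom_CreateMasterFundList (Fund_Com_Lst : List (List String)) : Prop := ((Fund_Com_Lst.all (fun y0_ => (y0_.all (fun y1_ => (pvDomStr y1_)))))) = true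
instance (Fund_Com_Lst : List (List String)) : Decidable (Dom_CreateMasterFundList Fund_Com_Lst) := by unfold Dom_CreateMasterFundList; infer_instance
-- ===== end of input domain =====

-- B changes the single dict-building pass into a first-appearance scan for the distinct
-- schemes followed by one filter per scheme (alternative decomposition, not faster).

-- ===== PORT A =====
-- Fund_Grp_Lst = {}; Fields = lst[0]; for row in lst: if row[1] not in d: d[row[1]] = []; d[row[1]].append(row)
def CreateMasterFundList (Fund_Com_Lst : List (List String)) : (List (String × List (List String))) × List String :=
  let Fields := PySem.List.pyGetD Fund_Com_Lst 0 []
  let Fund_Grp_Lst := Fund_Com_Lst.foldl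
    (fun d Fund_Row =>
      let Fund_Sch := PySem.List.pyGetD Fund_Row 1 ""
      let d := if d.contains Fund_Sch then d else d.insert Fund_Sch []
      d.modify Fund_Sch [] (fun v => v ++ [Fund_Row]))
    PySem.Dict.empty
  (Fund_Grp_Lst.items, Fields)

-- ===== PORT B =====
-- one pass collecting the distinct schemes in first-appearance order, then one filter per scheme
def CreateMasterFundList_alt (Fund_Com_Lst : List (List String)) : (List (String × List (List String))) × List String :=
  let acc := Fund_Com_Lst.foldl
    (fun (acc : PySem.Set String × List String) row =>
      let s := PySem.List.pyGetD row 1 ""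
      if s ∈ acc.1 then acc else (PySem.Set.add acc.1 s, acc.2 ++ [s]))
    (PySem.Set.empty, [])
  let grp := acc.2.map
    (fun s => (s, Fund_Com_Lst.filter (fun row => PySem.List.pyGetD row 1 "" == s)))
  (grp, PySem.List.pyGetD Fund_Com_Lst 0 [])

-- ===== PRECONDITION & SPEC =====
-- Pre_ excludes exactly the inputs on which A raises IndexError: the empty list (lst[0]) and
-- lists containing a row of length < 2 (row[1]).
def Pre_CreateMasterFundList (Fund_Com_Lst : List (List String)) : Prop :=
  Fund_Com_Lst ≠ [] ∧ ∀ row ∈ Fund_Com_Lst, 2 ≤ row.length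
instance (Fund_Com_Lst : List (List String)) : Decidable (Pre_CreateMasterFundList Fund_Com_Lst) := by unfold Pre_CreateMasterFundList; infer_instance

def pvWitness_CreateMasterFundList : List (List String) :=
  [["id", "scheme"], ["1", "A"], ["2", "B"], ["3", "A"]]

def Spec_CreateMasterFundList (Fund_Com_Lst : List (List String)) (out : (List (String × List (List String))) × List String) : Prop := out = CreateMasterFundList_alt Fund_Com_Lst
instance (Fund_Com_Lst : List (List String)) (out : (List (String × List (List String))) × List String) : Decidable (Spec_CreateMasterFundList Fund_Com_Lst out) := by unfold Spec_CreateMasterFundList; infer_instance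

-- ===== CLAIM (what is proved, stated in full; the proofs are below) =====
def Claim_equal_CreateMasterFundList : Prop := ∀ (Fund_Com_Lst : List (List String)), Dom_CreateMasterFundList Fund_Com_Lst → Pre_CreateMasterFundList Fund_Com_Lst → Spec_CreateMasterFundList Fund_Com_Lst (CreateMasterFundList Fund_Com_Lst)

-- ===== LEMMAS AND PROOFS =====

-- the scheme key of a row
def pvKey (row : List String) : String := PySem.List.pyGetD row 1 ""

-- A's per-row step ("if absent, insert []; then append") is a plain modify-append
lemma stepA_eq (d : PySem.Dict String (List (List String))) (r : List String) :
    (let d' := if d.contains (pvKey r) then d else d.insert (pvKey r) [];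
     d'.modify (pvKey r) [] (fun v => v ++ [r]))
    = d.modify (pvKey r) [] (fun v => v ++ [r]) := by
  by_cases h : d.contains (pvKey r)
  · simp [h]
  · simp only [h]
    show (d.insert (pvKey r) []).insert (pvKey r)
        (((d.insert (pvKey r) []).getD (pvKey r) []) ++ [r])
      = d.insert (pvKey r) ((d.getD (pvKey r) []) ++ [r])
    rw [PySem.Dict.getD_insert_self, PySem.Dict.insert_insert_self,
        PySem.Dict.getD_of_not_contains d _ (by simpa using h)]

-- B's scan keeps its two accumulators equal: both are Set.update of the keys seen so far
lemma foldB_eq (l : List (List String)) (s : PySem.Set String) :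
    l.foldl
      (fun (acc : PySem.Set String × List String) row =>
        let k := PySem.List.pyGetD row 1 ""
        if k ∈ acc.1 then acc else (PySem.Set.add acc.1 k, acc.2 ++ [k]))
      (s, s)
    = (PySem.Set.update s (l.map pvKey), PySem.Set.update s (l.map pvKey)) := by
  induction l generalizing s with
  | nil => simp [PySem.Set.update_nil]
  | cons r l ih =>
    have hstep :
        (let k := PySem.List.pyGetD r 1 ""
         if k ∈ (s, s).1 then (s, s) else (PySem.Set.add (s, s).1 k, (s, s).2 ++ [k]))
        = ((PySem.Set.add s (pvKey r)), (PySem.Set.add s (pvKey r))) := by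
      by_cases h : PySem.List.pyGetD r 1 "" ∈ s
      · simp [pvKey, if_pos h, PySem.Set.add_of_mem h]
      · simp [pvKey, if_neg h, PySem.Set.add_of_not_mem h]
    simp only [List.foldl_cons, hstep, ih, List.map_cons, PySem.Set.update_cons]

-- ===== VERDICT (by name: the statement is the Claim_ definition above) =====
theorem CreateMasterFundList_spec : Claim_equal_CreateMasterFundList := by
  intro l _ _
  unfold Spec_CreateMasterFundList CreateMasterFundList CreateMasterFundList_alt
  simp only
  congr 1
  -- A's grouping dict, rewritten step by step
  have hA : (l.foldl
      (fun d r =>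
        let k := PySem.List.pyGetD r 1 ""
        let d' := if d.contains k then d else d.insert k []
        d'.modify k [] (fun v => v ++ [r]))
      PySem.Dict.empty)
    = (l.map (fun r => (pvKey r, r))).foldl
        (fun d p => d.modify p.1 [] (fun v => v ++ [p.2])) PySem.Dict.empty := by
    rw [List.foldl_map]
    exact PySem.List.foldl_congr_mem l _ _ _ (fun d r _ => stepA_eq d r)
  set G := (l.map (fun r => (pvKey r, r))).foldl
      (fun d p => d.modify p.1 [] (fun v => v ++ [p.2])) PySem.Dict.empty with hG
  have hnd : G.keys.Nodup := by
    rw [hG, List.foldl_map]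
    exact PySem.Dict.nodup_keys_foldl_modify_key l pvKey [] (fun _ r => (· ++ [r])) _
      PySem.Dict.nodup_keys_empty
  have hkeys : G.keys = PySem.Set.ofList (l.map pvKey) := by
    rw [hG, List.foldl_map]
    rw [PySem.Dict.keys_foldl_modify_key]
    simp [PySem.Set.update_nil_left]
  have hgetD : ∀ c, G.getD c [] = l.filter (fun r => pvKey r == c) := by
    intro c
    rw [hG, PySem.Dict.getD_foldl_modify_append]
    rw [PySem.Dict.getD_empty, List.filter_map, List.map_map]
    simp [Function.comp_def, pvKey]
  rw [hA, PySem.Dict.items_eq_map_keys G hnd [], hkeys]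
  have hB : (l.foldl
      (fun (acc : PySem.Set String × List String) row =>
        let k := PySem.List.pyGetD row 1 ""
        if k ∈ acc.1 then acc else (PySem.Set.add acc.1 k, acc.2 ++ [k]))
      (PySem.Set.empty, [])).2 = PySem.Set.ofList (l.map pvKey) := by
    have := foldB_eq l PySem.Set.empty
    rw [show (PySem.Set.empty : PySem.Set String) = ([] : List String) from rfl] at this ⊢
    rw [this, PySem.Set.update_nil_left]
  rw [hB]
  refine List.map_congr_left (fun k _ => ?_)
  rw [hgetD k]
  simp [pvKey]
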